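-- pv_equiv track=rewrite | github.com/eric-s-s/dicetables_db | mongo_dicetables/connections/sql_connection.py | _get_projection_type
-- ===== SOURCE A (Python) =====
-- def _get_projection_type(projection):
--     bool_list = [bool(value) for value in projection.values()]
--     if True in bool_list:
--         if False in bool_list:
--             return 'error'
--         else:
--             return 'include'
--     return 'exclude'
-- ===== SOURCE B (Python) =====
-- def _get_projection_type(projection):
--     it = iter(projection.values())
--     for first in it:
--         expect = bool(first)
--         for v in it:
--             if bool(v) != expect:
--                 return 'error'
--         return 'include' if expect else 'exclude'
--     return 'exclude'
-- ===== Notes on version B (the rewrite author's own statement) =====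
-- stated objective: alternative
-- what changed: Instead of building a bool list and doing two membership scans, B anchors on the truthiness of the first value and scans the remainder for a mismatch, returning 'error' at the first one it sees (early exit), 'include'/'exclude' from the anchor's truthiness if homogeneous, and 'exclude' for an empty dict.
import Mathlib
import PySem

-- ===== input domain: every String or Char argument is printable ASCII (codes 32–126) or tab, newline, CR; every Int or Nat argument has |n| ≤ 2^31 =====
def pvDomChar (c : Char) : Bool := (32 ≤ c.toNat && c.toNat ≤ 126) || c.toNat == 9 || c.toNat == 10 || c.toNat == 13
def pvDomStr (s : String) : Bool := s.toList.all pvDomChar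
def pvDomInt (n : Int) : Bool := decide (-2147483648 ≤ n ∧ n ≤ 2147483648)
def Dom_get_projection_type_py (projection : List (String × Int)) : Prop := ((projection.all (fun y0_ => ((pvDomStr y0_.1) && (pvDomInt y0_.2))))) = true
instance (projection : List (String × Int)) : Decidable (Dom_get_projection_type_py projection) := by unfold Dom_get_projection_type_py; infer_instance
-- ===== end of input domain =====

-- B replaces A's bool list + two membership scans by an early-exit scan anchored on the
-- first value's truthiness (alternative decomposition; same O(n) cost).

-- ===== PORT A =====
-- literal port of A: bool list from the dict's values, then two membership tests
def get_projection_type_py (projection : List (String × Int)) : String :=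
  let bool_list := (PySem.Dict.ofList projection).values.map (fun v => decide (v ≠ 0))
  if true ∈ bool_list then
    if false ∈ bool_list then "error" else "include"
  else "exclude"

-- ===== PORT B =====
-- port of B: anchor on first value's truthiness, scan the rest for a mismatch (List.all
-- short-circuits like the Python inner loop); empty dict -> "exclude"
def get_projection_type_py_alt (projection : List (String × Int)) : String :=
  match (PySem.Dict.ofList projection).values with
  | [] => "exclude"
  | first :: rest =>
    let expect := decide (first ≠ 0)
    if rest.all (fun v => decide (v ≠ 0) == expect) then
      if expect then "include" else "exclude"
    else "error"

-- ===== PRECONDITION & SPEC =====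
def Spec_get_projection_type_py (projection : List (String × Int)) (out : String) : Prop := out = get_projection_type_py_alt projection
instance (projection : List (String × Int)) (out : String) : Decidable (Spec_get_projection_type_py projection out) := by unfold Spec_get_projection_type_py; infer_instance

-- ===== CLAIM (what is proved, stated in full; the proofs are below) =====
def Claim_equal_get_projection_type_py : Prop := ∀ (projection : List (String × Int)), Dom_get_projection_type_py projection → Spec_get_projection_type_py projection (get_projection_type_py projection)

-- ===== LEMMAS AND PROOFS =====

-- ===== VERDICT (by name: the statement is the Claim_ definition above) =====
-- the classification of any value list agrees between the two shapes
theorem pv_classify (vs : List Int) :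
    (let bool_list := vs.map (fun v => decide (v ≠ 0))
     if true ∈ bool_list then
       if false ∈ bool_list then "error" else "include"
     else "exclude")
    = (match vs with
       | [] => "exclude"
       | first :: rest =>
         let expect := decide (first ≠ 0)
         if rest.all (fun v => decide (v ≠ 0) == expect) then
           if expect then "include" else "exclude"
         else "error") := by
  cases vs with
  | nil => simp
  | cons x xs =>
    show (if true ∈ (x :: xs).map (fun v => decide (v ≠ 0)) then
            if false ∈ (x :: xs).map (fun v => decide (v ≠ 0)) then "error" else "include"
          else "exclude")
        = (if (xs.all fun v => decide (v ≠ 0) == decide (x ≠ 0)) = true then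
             if decide (x ≠ 0) = true then "include" else "exclude" else "error")
    by_cases hx : x ≠ 0
    · by_cases hall : (xs.all fun v => decide (v ≠ 0) == decide (x ≠ 0)) = true
      · have h : ∀ v ∈ xs, v ≠ 0 := by
          intro v hv
          have := (List.all_eq_true.mp hall) v hv
          simp [hx] at this; exact this
        have ht : true ∈ (x :: xs).map (fun v => decide (v ≠ 0)) :=
          List.mem_map.mpr ⟨x, List.mem_cons_self, by simp [hx]⟩
        have hnof : false ∉ (x :: xs).map (fun v => decide (v ≠ 0)) := by
          intro hmem
          rcases List.mem_map.mp hmem with ⟨v, hv, hfv⟩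
          rcases List.mem_cons.mp hv with rfl | hv'
          · exact hx (by simpa using hfv)
          · exact h v hv' (by simpa using hfv)
        rw [if_pos ht, if_neg hnof, if_pos hall, if_pos (by simp [hx])]
      · have ht : true ∈ (x :: xs).map (fun v => decide (v ≠ 0)) :=
          List.mem_map.mpr ⟨x, List.mem_cons_self, by simp [hx]⟩
        have hf : false ∈ (x :: xs).map (fun v => decide (v ≠ 0)) := by
          simp only [List.all_eq_true, not_forall] at hall
          rcases hall with ⟨v, hv, hne⟩
          simp only [beq_iff_eq, decide_eq_decide] at hne
          have hv0 : v = 0 := by tauto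
          exact List.mem_map.mpr ⟨v, List.mem_cons_of_mem _ hv, by simp [hv0]⟩
        rw [if_pos ht, if_pos hf, if_neg hall]
    · by_cases hall : (xs.all fun v => decide (v ≠ 0) == decide (x ≠ 0)) = true
      · have h : ∀ v ∈ xs, v = 0 := by
          intro v hv
          have := (List.all_eq_true.mp hall) v hv
          simp [of_not_not hx] at this; exact this
        have hnot : true ∉ (x :: xs).map (fun v => decide (v ≠ 0)) := by
          intro hmem
          rcases List.mem_map.mp hmem with ⟨v, hv, htv⟩
          rcases List.mem_cons.mp hv with rfl | hv'
          · exact hx (by simpa using htv)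
          · exact absurd (h v hv') (by simpa using htv)
        rw [if_neg hnot, if_pos hall, if_neg (by simp [of_not_not hx])]
      · have hvx : ∃ v ∈ xs, v ≠ 0 := by
          simp only [List.all_eq_true, not_forall] at hall
          rcases hall with ⟨v, hv, hne⟩
          simp only [beq_iff_eq, decide_eq_decide] at hne
          exact ⟨v, hv, by tauto⟩
        rcases hvx with ⟨v, hv, hvne⟩
        have ht : true ∈ (x :: xs).map (fun v => decide (v ≠ 0)) :=
          List.mem_map.mpr ⟨v, List.mem_cons_of_mem _ hv, by simp [hvne]⟩
        have hf : false ∈ (x :: xs).map (fun v => decide (v ≠ 0)) :=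
          List.mem_map.mpr ⟨x, List.mem_cons_self, by simp [of_not_not hx]⟩
        rw [if_pos ht, if_pos hf, if_neg hall]

theorem get_projection_type_py_spec : Claim_equal_get_projection_type_py := by
  intro projection _
  unfold Spec_get_projection_type_py get_projection_type_py get_projection_type_py_alt
  exact pv_classify ((PySem.Dict.ofList projection).values)
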